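-- pv_equiv track=rewrite | github.com/aluferraz/leetcode-python | leetcode/editor/en/Q2549/CountDistinctNumbersOnBoard.py | distinctIntegers
-- ===== SOURCE A (Python) =====
-- def distinctIntegers(N):
--     """
--     :type n: int
--     :rtype: int
--     """
--
--     board = [0 for _ in range(N + 1)]
--
--     def place(x):
--         if board[x] != 0:
--             return
--         for i in range(1, x + 1):
--             if x % i == 1:
--                 place(i % x)
--         board[x] = 1
--
--     place(N)
--     return sum(board)
-- ===== SOURCE B (Python) =====
-- def distinctIntegers(N):
--     # Closed form: the process reaches exactly the integers 2..N (plus the start),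
--     # so the count is max(N - 1, 1).
--     return max(N - 1, 1)
-- ===== Notes on version B (the rewrite author's own statement) =====
-- stated objective: faster
-- what changed: Replaced the recursive board-marking simulation (which marks exactly the integers 2..N) by the closed form max(N-1, 1).
import Mathlib
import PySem

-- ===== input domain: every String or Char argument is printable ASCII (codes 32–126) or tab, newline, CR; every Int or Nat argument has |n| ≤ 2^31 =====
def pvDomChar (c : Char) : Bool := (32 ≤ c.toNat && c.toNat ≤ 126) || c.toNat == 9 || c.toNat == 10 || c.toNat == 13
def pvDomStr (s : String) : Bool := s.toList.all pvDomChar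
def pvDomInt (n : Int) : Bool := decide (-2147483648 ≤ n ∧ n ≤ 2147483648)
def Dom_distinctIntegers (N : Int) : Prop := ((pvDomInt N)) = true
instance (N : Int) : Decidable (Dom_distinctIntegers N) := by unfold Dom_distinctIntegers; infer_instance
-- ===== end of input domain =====

-- B replaces A's recursive board-marking simulation by the closed form max(N-1, 1);
-- equivalence is proved on Pre_ (A raises IndexError when N is negative).

-- ===== PORT A =====
-- Python's inner `def place(x)` with the mutable `board` threaded as explicit state;
-- the `for i in range(1, x + 1)` loop is the fold over `List.range' 1 x`.
def placeA : List Int → Nat → List Int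
  | b, x =>
    if b.getD x 0 ≠ 0 then b
    else
      ((List.range' 1 x).attach.foldl
        (fun c i => if x % i.1 = 1 then placeA c (i.1 % x) else c) b).set x 1
termination_by b x => x
decreasing_by
  have h := List.mem_range'.mp i.2
  exact Nat.mod_lt _ (by omega)

def distinctIntegers (N : Int) : Int :=
  (placeA (List.replicate (N.toNat + 1) (0 : Int)) N.toNat).foldl (· + ·) 0

-- ===== PORT B =====
def distinctIntegers_alt (N : Int) : Int := max (N - 1) 1

-- ===== PRECONDITION & SPEC =====
-- A raises IndexError on negative N (the board is empty and board[N] fails); Pre_ excludes exactly those inputs.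
def Pre_distinctIntegers (N : Int) : Prop := 0 ≤ N
instance (N : Int) : Decidable (Pre_distinctIntegers N) := by unfold Pre_distinctIntegers; infer_instance
def pvWitness_distinctIntegers : Int := 5

def Spec_distinctIntegers (N : Int) (out : Int) : Prop := out = distinctIntegers_alt N
instance (N : Int) (out : Int) : Decidable (Spec_distinctIntegers N out) := by unfold Spec_distinctIntegers; infer_instance

-- ===== CLAIM (what is proved, stated in full; the proofs are below) =====
def Claim_equal_distinctIntegers : Prop := ∀ (N : Int), Dom_distinctIntegers N → Pre_distinctIntegers N → Spec_distinctIntegers N (distinctIntegers N)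

-- ===== LEMMAS AND PROOFS =====

theorem foldl_attach_place (x : Nat) (l : List Nat) (b : List Int) :
    l.attach.foldl (fun c i => if x % i.1 = 1 then placeA c (i.1 % x) else c) b
      = l.foldl (fun c i => if x % i = 1 then placeA c (i % x) else c) b := by
  induction l generalizing b with
  | nil => simp
  | cons a t ih => simp [List.attach_cons, List.foldl_map, ih]

theorem range'_split (x : Nat) (h : 2 ≤ x) :
    List.range' 1 x = List.range' 1 (x-2) ++ [x-1, x] := by
  have h2 : x = (x-2) + 2 := by omega
  rw [h2, ← List.range'_append]
  congr 1
  simp [List.range']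
  omega

theorem getD_set_ne (l : List Int) (i j : Nat) (a : Int) (h : i ≠ j) :
    (l.set i a).getD j 0 = l.getD j 0 := by
  simp [List.getD_eq_getElem?_getD, List.getElem?_set_ne h]

theorem getD_set_self (l : List Int) (i : Nat) (a : Int) (h : i < l.length) :
    (l.set i a).getD i 0 = a := by
  simp [List.getD_eq_getElem?_getD, h]

-- Main characterisation: on a 0/1 board whose marked part is downward closed above 2,
-- `placeA b x` (2 ≤ x < |b|) marks exactly the positions 2..x and keeps everything else.
theorem placeA_main : ∀ (x : Nat) (b : List Int), 2 ≤ x → x < b.length →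
    (∀ j, b.getD j 0 = 0 ∨ b.getD j 0 = 1) →
    (∀ j k, b.getD j 0 = 1 → 2 ≤ k → k ≤ j → b.getD k 0 = 1) →
    (placeA b x).length = b.length ∧
    (∀ j, (placeA b x).getD j 0 = if 2 ≤ j ∧ j ≤ x then 1 else b.getD j 0) := by
  intro x
  induction x using Nat.strong_induction_on with
  | _ x IH =>
  intro b hx hlen h01 hP
  rw [placeA]
  by_cases hmark : b.getD x 0 ≠ 0
  · rw [if_pos hmark]
    refine ⟨rfl, fun j => ?_⟩
    split_ifs with hj
    · have hx1 : b.getD x 0 = 1 := (h01 x).resolve_left hmark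
      exact hP x j hx1 hj.1 hj.2
    · rfl
  · rw [if_neg hmark]
    rw [not_not] at hmark
    rw [foldl_attach_place]
    -- loop invariant over any list of indices 1 ≤ i < x
    have LL : ∀ (l : List Nat) (c : List Int), (∀ i ∈ l, 1 ≤ i ∧ i < x) →
        c.length = b.length →
        (∀ j, c.getD j 0 = 0 ∨ c.getD j 0 = 1) →
        (∀ j k, c.getD j 0 = 1 → 2 ≤ k → k ≤ j → c.getD k 0 = 1) →
        (l.foldl (fun c i => if x % i = 1 then placeA c (i % x) else c) c).length = b.length ∧
        (∀ j, (l.foldl (fun c i => if x % i = 1 then placeA c (i % x) else c) c).getD j 0 = 0 ∨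
              (l.foldl (fun c i => if x % i = 1 then placeA c (i % x) else c) c).getD j 0 = 1) ∧
        (∀ j k, (l.foldl (fun c i => if x % i = 1 then placeA c (i % x) else c) c).getD j 0 = 1 → 2 ≤ k → k ≤ j →
              (l.foldl (fun c i => if x % i = 1 then placeA c (i % x) else c) c).getD k 0 = 1) ∧
        (∀ j, (j < 2 ∨ x ≤ j) →
              (l.foldl (fun c i => if x % i = 1 then placeA c (i % x) else c) c).getD j 0 = c.getD j 0) := by
      intro l
      induction l with
      | nil => intro c _ hc hc01 hcP; exact ⟨hc, hc01, hcP, fun _ _ => rfl⟩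
      | cons i t iht =>
        intro c hmem hc hc01 hcP
        have hi := hmem i (List.mem_cons_self ..)
        simp only [List.foldl_cons]
        by_cases hcond : x % i = 1
        · have hi2 : 2 ≤ i := by
            rcases Nat.lt_or_ge i 2 with h2 | h2
            · interval_cases i
              · omega
              · simp [Nat.mod_one] at hcond
            · exact h2
          have himod : i % x = i := Nat.mod_eq_of_lt hi.2
          rw [if_pos hcond, himod]
          obtain ⟨hlen', hform⟩ := IH i hi.2 c hi2 (by omega) hc01 hcP
          have h01' : ∀ j, (placeA c i).getD j 0 = 0 ∨ (placeA c i).getD j 0 = 1 := by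
            intro j; rw [hform j]; split_ifs
            · right; rfl
            · exact hc01 j
          have hP' : ∀ j k, (placeA c i).getD j 0 = 1 → 2 ≤ k → k ≤ j → (placeA c i).getD k 0 = 1 := by
            intro j k h1 h2k hkj
            by_cases hk : 2 ≤ k ∧ k ≤ i
            · rw [hform k, if_pos hk]
            · have hj : ¬ (2 ≤ j ∧ j ≤ i) := fun h => hk ⟨h2k, le_trans hkj h.2⟩
              rw [hform j, if_neg hj] at h1
              rw [hform k, if_neg hk]
              exact hcP j k h1 h2k hkj
          obtain ⟨L1, L2, L3, L4⟩ := iht (placeA c i) (fun a ha => hmem a (List.mem_cons_of_mem _ ha))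
            (by rw [hlen', hc]) h01' hP'
          refine ⟨L1, L2, L3, fun j hj => ?_⟩
          rw [L4 j hj, hform j, if_neg (by omega)]
        · rw [if_neg hcond]
          exact iht c (fun a ha => hmem a (List.mem_cons_of_mem _ ha)) hc hc01 hcP
    by_cases hx2 : x = 2
    · subst hx2
      have hr : List.range' 1 2 = [1, 2] := by decide
      rw [hr]
      simp only [List.foldl_cons, List.foldl_nil]
      rw [if_neg (by norm_num), if_neg (by norm_num)]
      refine ⟨by simp, fun j => ?_⟩
      by_cases hj : j = 2
      · subst hj
        rw [getD_set_self _ _ _ (by omega), if_pos ⟨le_refl _, le_refl _⟩]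
      · rw [getD_set_ne _ _ _ _ (fun h => hj h.symm), if_neg (by omega)]
    · have hx3 : 3 ≤ x := by omega
      rw [range'_split x hx, List.foldl_append]
      obtain ⟨L1, L2, L3, L4⟩ := LL (List.range' 1 (x-2)) b
        (fun i hi => by have := List.mem_range'.mp hi; omega) rfl h01 hP
      set c0 := (List.range' 1 (x-2)).foldl (fun c i => if x % i = 1 then placeA c (i % x) else c) b with hc0
      simp only [List.foldl_cons, List.foldl_nil]
      have hcondx1 : x % (x-1) = 1 := by
        have h1 : x - 1 + 1 = x := by omega
        calc x % (x-1) = (x - 1 + 1) % (x-1) := by rw [h1]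
          _ = 1 % (x-1) := Nat.add_mod_left _ _
          _ = 1 := Nat.mod_eq_of_lt (by omega)
      have hmodx1 : (x-1) % x = x - 1 := Nat.mod_eq_of_lt (by omega)
      rw [if_pos hcondx1, hmodx1]
      obtain ⟨M1, M2⟩ := IH (x-1) (by omega) c0 (by omega) (by omega) L2 L3
      rw [if_neg (by simp [Nat.mod_self])]
      have hlenf : ((placeA c0 (x-1)).set x 1).length = b.length := by
        rw [List.length_set, M1, L1]
      refine ⟨hlenf, fun j => ?_⟩
      by_cases hjx : j = x
      · subst hjx
        rw [getD_set_self _ _ _ (by rw [M1, L1]; omega)]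
        rw [if_pos ⟨by omega, le_refl _⟩]
      · rw [getD_set_ne _ _ _ _ (fun h => hjx h.symm)]
        by_cases hj : 2 ≤ j ∧ j ≤ x
        · have hj1 : 2 ≤ j ∧ j ≤ x - 1 := ⟨hj.1, by omega⟩
          rw [M2 j, if_pos hj1, if_pos hj]
        · rw [M2 j, if_neg (by omega), if_neg hj]
          exact L4 j (by omega)

theorem placeA_replicate (x : Nat) (hx : 2 ≤ x) :
    placeA (List.replicate (x + 1) (0 : Int)) x = 0 :: 0 :: List.replicate (x - 1) 1 := by
  have hrep : ∀ j, (List.replicate (x+1) (0:Int)).getD j 0 = 0 := by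
    intro j; simp [List.getD_eq_getElem?_getD]
  obtain ⟨hl, hform⟩ := placeA_main x (List.replicate (x + 1) (0 : Int)) hx
    (by simp) (fun j => Or.inl (hrep j)) (fun j k h1 => by rw [hrep j] at h1; omega)
  have hlen : (placeA (List.replicate (x + 1) (0 : Int)) x).length = x + 1 := by
    simpa using hl
  apply List.ext_getElem
  · simp [hlen]; omega
  · intro i h1 h2
    rw [← List.getD_eq_getElem _ 0, ← List.getD_eq_getElem _ 0, hform i, hrep i]
    match i with
    | 0 => simp
    | 1 => simp
    | (j+2) =>
      have hij : j + 2 ≤ x := by rw [hlen] at h1; omega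
      rw [if_pos ⟨by omega, hij⟩]
      simp only [List.getD_cons_succ]
      have hjlt : j < x - 1 := by omega
      simp [List.getD_eq_getElem?_getD, hjlt]

theorem foldl_add_replicate (n : Nat) (a : Int) :
    (List.replicate n (1 : Int)).foldl (· + ·) a = a + n := by
  induction n generalizing a with
  | zero => simp
  | succ m ih => simp [List.replicate_succ, List.foldl_cons, ih]; ring

-- ===== VERDICT (by name: the statement is the Claim_ definition above) =====
theorem distinctIntegers_spec : Claim_equal_distinctIntegers := by
  intro N _ hN
  unfold Pre_distinctIntegers at hN
  unfold Spec_distinctIntegers distinctIntegers distinctIntegers_alt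
  have hNx : ((N.toNat : Int)) = N := Int.toNat_of_nonneg hN
  rcases Nat.lt_or_ge N.toNat 2 with hsm | hbig
  · interval_cases h : N.toNat
    · have hN0 : N = 0 := by omega
      subst hN0
      rw [placeA]
      norm_num [List.range']
    · have hN1 : N = 1 := by omega
      subst hN1
      rw [placeA]
      norm_num [List.range', List.attach, List.attachWith]
      decide
  · rw [placeA_replicate N.toNat hbig]
    simp only [List.foldl_cons]
    norm_num [foldl_add_replicate]
    rw [max_eq_left (by omega : (1:Int) ≤ N - 1)]
    push_cast [Nat.cast_sub (by omega : 1 ≤ N.toNat)]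
    omega
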